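-- pv_equiv track=rewrite | github.com/kergene/advent-code | 2020/code_day_11.py | replace_seat_long
-- ===== SOURCE A (Python) =====
-- DIRECTIONS = (
--     (-1,-1),(-1,0),(-1,1),
--     (0,-1),        (0,1),
--     (1,-1), (1,0), (1,1)
-- )
--
-- def replace_seat_long(x, y, data, n, m):
--     if data[x][y] == 'L':
--         for dx, dy in DIRECTIONS:
--             a,b=x,y
--             seat = False
--             while not seat:
--                 seat = True
--                 a,b = a+dx,b+dy
--                 if 0 <= a < n and 0 <= b < m:
--                     if data[a][b] == '.':
--                         seat = False
--                     elif data[a][b] == '#':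
--                         return 'L'
--         return '#'
--     elif data[x][y] == '#':
--         fulls = 0
--         for dx, dy in DIRECTIONS:
--             a,b=x,y
--             seat = False
--             while not seat:
--                 seat = True
--                 a,b = a+dx,b+dy
--                 if 0 <= a < n and 0 <= b < m:
--                     if data[a][b] == '.':
--                         seat = False
--                     elif data[a][b] == '#':
--                         fulls += 1
--                         if fulls >= 5:
--                             return 'L'
--         return '#'
--     else:
--         return data[x][y]
-- ===== SOURCE B (Python) =====
-- def replace_seat_long(x, y, data, n, m):
--     c = data[x][y]
--     if c not in ('L', '#'):
--         return c
--
--     def sees(a, b):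
--         # (a,b) is visible from (x,y): collinear along a queen line and every
--         # strictly-between cell is in bounds and floor ('.')
--         da, db = a - x, b - y
--         if da == 0 and db == 0:
--             return False
--         if da != 0 and db != 0 and abs(da) != abs(db):
--             return False
--         sx = (da > 0) - (da < 0)
--         sy = (db > 0) - (db < 0)
--         for i in range(1, max(abs(da), abs(db))):
--             p, q = x + i * sx, y + i * sy
--             if not (0 <= p < n and 0 <= q < m):
--                 return False
--             if data[p][q] != '.':
--                 return False
--         return True
--
--     occupied = sum(1 for a in range(n) for b in range(m)
--                    if data[a][b] == '#' and sees(a, b))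
--     if c == 'L':
--         return '#' if occupied == 0 else 'L'
--     return 'L' if occupied >= 5 else '#'
-- ===== Notes on version B (the rewrite author's own statement) =====
-- stated objective: alternative
-- what changed: B drops A's per-direction ray walking entirely: it scans every grid cell once and counts the occupied cells that pass a line-of-sight predicate (collinear with the seat along a queen line with every strictly-between cell in bounds and floor), then decides both seat states by thresholds on that single count.
-- outside the precondition, e.g. on replace_seat_long(1, 0, [['#'], ['L']], 3, 1): A returns 'L', B raises IndexError
import Mathlib
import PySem

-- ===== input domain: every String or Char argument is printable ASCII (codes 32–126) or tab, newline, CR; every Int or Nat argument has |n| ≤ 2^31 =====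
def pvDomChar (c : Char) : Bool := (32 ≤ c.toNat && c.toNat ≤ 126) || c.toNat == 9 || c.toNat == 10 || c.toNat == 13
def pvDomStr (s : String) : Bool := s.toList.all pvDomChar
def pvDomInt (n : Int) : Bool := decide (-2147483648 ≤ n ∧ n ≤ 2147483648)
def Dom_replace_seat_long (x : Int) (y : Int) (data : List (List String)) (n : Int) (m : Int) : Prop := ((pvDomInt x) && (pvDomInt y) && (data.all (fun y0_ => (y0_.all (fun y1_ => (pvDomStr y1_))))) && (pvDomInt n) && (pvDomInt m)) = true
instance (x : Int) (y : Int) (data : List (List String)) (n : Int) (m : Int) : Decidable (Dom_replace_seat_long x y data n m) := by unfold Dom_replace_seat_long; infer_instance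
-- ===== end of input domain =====

-- B replaces A's eight early-exit ray walks by a single whole-grid scan that counts the
-- occupied cells passing a line-of-sight predicate, then applies the two thresholds
-- (objective: alternative algorithm, not faster).

-- data[x][y] (Python indexing, negative indices wrap); shared by both ports and by Pre_
def pvCellAt (a : Int) (b : Int) (data : List (List String)) : Option String :=
  (PySem.List.pyGet? data a).bind (fun row => PySem.List.pyGet? row b)

def DIRECTIONS : List (Int × Int) :=
  [(-1,-1),(-1,0),(-1,1),(0,-1),(0,1),(1,-1),(1,0),(1,1)]

-- fuel bound for A's ray walks: enough steps for the guard 0 ≤ a < n ∧ 0 ≤ b < m to fail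
-- along any of the eight (nonzero) directions; a pure totality device, never reached
def pvFuel (x y n m : Int) : Nat := x.natAbs + y.natAbs + n.toNat + m.toNat + 2

-- ===== PORT A =====
-- A's while loop, one direction: steps to (a+dx,b+dy); if in the claimed bounds and '.',
-- keep walking; if '#', the branch of A returns / counts (true); otherwise the loop ends.
-- (out-of-grid access under the claimed bounds would raise in Python; excluded by Pre_)
def pvWalkA : Nat → Int → Int → Int → Int → List (List String) → Int → Int → Bool
  | 0, _, _, _, _, _, _, _ => false
  | fuel+1, a, b, dx, dy, data, n, m =>
    let a' := a + dx
    let b' := b + dy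
    if 0 ≤ a' ∧ a' < n ∧ 0 ≤ b' ∧ b' < m then
      match pvCellAt a' b' data with
      | some c => if c = "." then pvWalkA fuel a' b' dx dy data n m
                  else (c == "#")
      | none => false
    else false

-- A's 'L' branch: for each direction, early-return 'L' on a visible '#'
def pvLoopL (x y : Int) (data : List (List String)) (n m : Int) : List (Int × Int) → Bool
  | [] => false
  | d :: ds =>
    if pvWalkA (pvFuel x y n m) x y d.1 d.2 data n m then true
    else pvLoopL x y data n m ds

-- A's '#' branch: count fulls, early-return 'L' as soon as fulls >= 5
def pvLoopH (x y : Int) (data : List (List String)) (n m : Int) (fulls : Int) :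
    List (Int × Int) → Option String
  | [] => none
  | d :: ds =>
    if pvWalkA (pvFuel x y n m) x y d.1 d.2 data n m then
      let fulls' := fulls + 1
      if 5 ≤ fulls' then some "L" else pvLoopH x y data n m fulls' ds
    else pvLoopH x y data n m fulls ds

def replace_seat_long (x : Int) (y : Int) (data : List (List String)) (n : Int) (m : Int) : String :=
  match pvCellAt x y data with
  | none => ""   -- IndexError in Python; excluded by Pre_
  | some c =>
    if c = "L" then
      if pvLoopL x y data n m DIRECTIONS then "L" else "#"
    else if c = "#" then
      match pvLoopH x y data n m 0 DIRECTIONS with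
      | some r => r
      | none => "#"
    else c

-- ===== PORT B =====
-- Python's (v > 0) - (v < 0)
def pvSign (v : Int) : Int := (if 0 < v then 1 else 0) - (if v < 0 then 1 else 0)

-- B's sees(a, b): (a,b) is collinear with (x,y) along a queen line and every
-- strictly-between cell is inside the claimed bounds and is floor '.'
def pvSees (x y : Int) (data : List (List String)) (n m : Int) (a b : Int) : Bool :=
  let da := a - x
  let db := b - y
  if da = 0 ∧ db = 0 then false
  else if da ≠ 0 ∧ db ≠ 0 ∧ da.natAbs ≠ db.natAbs then false
  else
    let sx := pvSign da
    let sy := pvSign db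
    (PySem.List.pyRange 1 (max (da.natAbs : Int) (db.natAbs : Int)) 1).all (fun i =>
      decide (0 ≤ x + i*sx ∧ x + i*sx < n ∧ 0 ≤ y + i*sy ∧ y + i*sy < m) &&
      (pvCellAt (x + i*sx) (y + i*sy) data == some "."))

-- B's occupied: scan the whole claimed grid, count occupied cells that are seen
def pvOccupied (x y : Int) (data : List (List String)) (n m : Int) : Nat :=
  ((PySem.List.pyRange 0 n 1).map (fun a =>
     (PySem.List.pyRange 0 m 1).countP (fun b =>
        pvCellAt a b data == some "#" && pvSees x y data n m a b))).sum

def replace_seat_long_alt (x : Int) (y : Int) (data : List (List String)) (n : Int) (m : Int) : String :=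
  match pvCellAt x y data with
  | none => ""   -- IndexError in Python; excluded by Pre_
  | some c =>
    if c ≠ "L" ∧ c ≠ "#" then c
    else
      let occupied := pvOccupied x y data n m
      if c = "L" then (if occupied = 0 then "#" else "L")
      else (if 5 ≤ occupied then "L" else "#")

-- ===== PRECONDITION & SPEC =====
-- Pre_ excludes the inputs where Python raises IndexError: an invalid start index, and —
-- when the start cell is a seat, so that scanning happens — grids whose real dimensions are
-- smaller than the claimed bounds n, m (there A may still return when every ray happens to
-- stop early, but B's whole-grid scan then indexes outside the grid and raises).
def Pre_replace_seat_long (x : Int) (y : Int) (data : List (List String)) (n : Int) (m : Int) : Prop :=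
  (pvCellAt x y data).isSome ∧
  ((pvCellAt x y data = some "L" ∨ pvCellAt x y data = some "#") →
    (n ≤ 0 ∨ m ≤ 0 ∨ (n ≤ (data.length : Int) ∧ ∀ row ∈ data, m ≤ (row.length : Int))))
instance (x : Int) (y : Int) (data : List (List String)) (n : Int) (m : Int) : Decidable (Pre_replace_seat_long x y data n m) := by unfold Pre_replace_seat_long; infer_instance

def pvWitness_replace_seat_long : Int × Int × List (List String) × Int × Int :=
  (0, 0, [["L", "."], [".", "#"]], 2, 2)

def Spec_replace_seat_long (x : Int) (y : Int) (data : List (List String)) (n : Int) (m : Int) (out : String) : Prop := out = replace_seat_long_alt x y data n m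
instance (x : Int) (y : Int) (data : List (List String)) (n : Int) (m : Int) (out : String) : Decidable (Spec_replace_seat_long x y data n m out) := by unfold Spec_replace_seat_long; infer_instance

-- ===== CLAIM (what is proved, stated in full; the proofs are below) =====
def Claim_equal_replace_seat_long : Prop := ∀ (x : Int) (y : Int) (data : List (List String)) (n : Int) (m : Int), Dom_replace_seat_long x y data n m → Pre_replace_seat_long x y data n m → Spec_replace_seat_long x y data n m (replace_seat_long x y data n m)

-- ===== LEMMAS AND PROOFS =====

def pvInB (n m a b : Int) : Prop := 0 ≤ a ∧ a < n ∧ 0 ≤ b ∧ b < m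

def pvHit (a b dx dy n m : Int) (data : List (List String)) (k : Nat) : Prop :=
  pvInB n m (a + (k:Int)*dx) (b + (k:Int)*dy) ∧
  pvCellAt (a + (k:Int)*dx) (b + (k:Int)*dy) data = some "#" ∧
  ∀ i : Int, 1 ≤ i → i < (k:Int) →
    (pvInB n m (a + i*dx) (b + i*dy) ∧ pvCellAt (a + i*dx) (b + i*dy) data = some ".")

theorem pvWalkA_char (data : List (List String)) (n m dx dy : Int) :
    ∀ (f : Nat) (a b : Int),
    (pvWalkA f a b dx dy data n m = true ↔
      ∃ k : Nat, 1 ≤ k ∧ k ≤ f ∧ pvHit a b dx dy n m data k) := by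
  intro f
  induction f with
  | zero =>
    intro a b
    simp only [pvWalkA]
    constructor
    · intro h; exact absurd h (by simp)
    · rintro ⟨k, hk1, hkf, -⟩; omega
  | succ f ih =>
    intro a b
    simp only [pvWalkA]
    by_cases hg : 0 ≤ a + dx ∧ a + dx < n ∧ 0 ≤ b + dy ∧ b + dy < m
    · rw [if_pos hg]
      cases hcell : pvCellAt (a + dx) (b + dy) data with
      | none =>
        simp only [Bool.false_eq_true, false_iff]
        rintro ⟨k, hk1, hkf, hhit⟩
        rcases Nat.lt_or_ge k 2 with hk2 | hk2
        · have hk : k = 1 := by omega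
          subst hk
          have := hhit.2.1
          simp only [Nat.cast_one, one_mul] at this
          rw [hcell] at this; simp at this
        · have := (hhit.2.2 1 (by omega) (by exact_mod_cast by omega)).2
          simp only [one_mul] at this
          rw [hcell] at this; simp at this
      | some c =>
        by_cases hdot : c = "."
        · subst hdot
          have hred : (match some ("." : String) with
              | some c => if c = "." then pvWalkA f (a + dx) (b + dy) dx dy data n m
                          else c == "#"
              | none => false) = pvWalkA f (a + dx) (b + dy) dx dy data n m := by simp
          rw [hred, ih (a + dx) (b + dy)]
          constructor
          · rintro ⟨k, hk1, hkf, ht, hc, hmid⟩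
            refine ⟨k + 1, by omega, by omega, ?_, ?_, ?_⟩
            · have : a + ((k:Int) + 1)*dx = a + dx + (k:Int)*dx := by ring
              push_cast
              rw [this]
              have : b + ((k:Int) + 1)*dy = b + dy + (k:Int)*dy := by ring
              rw [this]
              exact ht
            · have h1 : a + ((k:Int) + 1)*dx = a + dx + (k:Int)*dx := by ring
              have h2 : b + ((k:Int) + 1)*dy = b + dy + (k:Int)*dy := by ring
              push_cast
              rw [h1, h2]
              exact hc
            · intro i hi1 hik
              push_cast at hik
              rcases eq_or_lt_of_le hi1 with hi | hi
              · constructor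
                · rw [← hi]; simpa using hg
                · rw [← hi]; simpa using hcell
              · have h1 : a + i*dx = a + dx + (i - 1)*dx := by ring
                have h2 : b + i*dy = b + dy + (i - 1)*dy := by ring
                rw [h1, h2]
                exact hmid (i - 1) (by omega) (by omega)
          · rintro ⟨k, hk1, hkf, ht, hc, hmid⟩
            match k, hk1 with
            | 1, _ =>
              exfalso
              simp only [Nat.cast_one, one_mul] at hc
              rw [hcell] at hc
              simp at hc
            | (k' + 2), _ =>
              refine ⟨k' + 1, by omega, by omega, ?_, ?_, ?_⟩
              · have h1 : a + dx + ((k':Int) + 1)*dx = a + ((k':Int) + 2)*dx := by ring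
                have h2 : b + dy + ((k':Int) + 1)*dy = b + ((k':Int) + 2)*dy := by ring
                push_cast
                rw [h1, h2]
                push_cast at ht
                exact ht
              · have h1 : a + dx + ((k':Int) + 1)*dx = a + ((k':Int) + 2)*dx := by ring
                have h2 : b + dy + ((k':Int) + 1)*dy = b + ((k':Int) + 2)*dy := by ring
                push_cast
                rw [h1, h2]
                push_cast at hc
                exact hc
              · intro i hi1 hik
                push_cast at hik
                have h1 : a + dx + i*dx = a + (i + 1)*dx := by ring
                have h2 : b + dy + i*dy = b + (i + 1)*dy := by ring
                rw [h1, h2]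
                exact hmid (i + 1) (by omega) (by push_cast; omega)
        · have hred : (match some c with
              | some c => if c = "." then pvWalkA f (a + dx) (b + dy) dx dy data n m
                          else c == "#"
              | none => false) = (c == "#") := by simp [hdot]
          rw [hred]
          constructor
          · intro hc
            have hc : c = "#" := by simpa using hc
            refine ⟨1, le_rfl, by omega, ?_, ?_, ?_⟩
            · simpa using hg
            · simp only [Nat.cast_one, one_mul]
              rw [hcell, hc]
            · intro i hi1 hik
              exfalso; exact absurd hik (by push_cast; omega)
          · rintro ⟨k, hk1, hkf, ht, hcc, hmid⟩
            rcases Nat.lt_or_ge k 2 with hk2 | hk2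
            · have hk : k = 1 := by omega
              subst hk
              simp only [Nat.cast_one, one_mul] at hcc
              rw [hcell] at hcc
              simp only [Option.some.injEq] at hcc
              simp [hcc]
            · exfalso
              have := (hmid 1 (by omega) (by exact_mod_cast by omega)).2
              simp only [one_mul] at this
              rw [hcell] at this
              simp only [Option.some.injEq] at this
              exact hdot this
    · rw [if_neg hg]
      simp only [Bool.false_eq_true, false_iff]
      rintro ⟨k, hk1, hkf, hhit⟩
      rcases Nat.lt_or_ge k 2 with hk2 | hk2
      · have hk : k = 1 := by omega
        subst hk
        have := hhit.1
        simp only [Nat.cast_one, one_mul] at this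
        exact hg this
      · exact hg (by simpa using (hhit.2.2 1 (by omega) (by exact_mod_cast by omega)).1)
theorem pvHit_le_fuel (x y n m : Int) (data : List (List String)) (d : Int × Int)
    (hd : d ∈ DIRECTIONS) (k : Nat) (h : pvHit x y d.1 d.2 n m data k) :
    k ≤ pvFuel x y n m := by
  obtain ⟨⟨h1, h2, h3, h4⟩, -, -⟩ := h
  unfold pvFuel
  simp only [DIRECTIONS, List.mem_cons, List.not_mem_nil, or_false] at hd
  rcases hd with rfl | rfl | rfl | rfl | rfl | rfl | rfl | rfl <;>
    simp only [] at h1 h2 h3 h4 <;> omega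

theorem pvHit_uniq (a b dx dy n m : Int) (data : List (List String)) (k k' : Nat)
    (hk : 1 ≤ k) (hk' : 1 ≤ k') (h : pvHit a b dx dy n m data k)
    (h' : pvHit a b dx dy n m data k') : k = k' := by
  by_contra hne
  rcases Nat.lt_or_ge k k' with hlt | hge
  · have hmid := (h'.2.2 (k:Int) (by exact_mod_cast hk) (by exact_mod_cast hlt)).2
    rw [h.2.1] at hmid
    simp at hmid
  · have hlt : k' < k := by omega
    have hmid := (h.2.2 (k':Int) (by exact_mod_cast hk') (by exact_mod_cast hlt)).2
    rw [h'.2.1] at hmid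
    simp at hmid

theorem pvWalkA_iff_hit (x y n m : Int) (data : List (List String)) (d : Int × Int)
    (hd : d ∈ DIRECTIONS) :
    (pvWalkA (pvFuel x y n m) x y d.1 d.2 data n m = true ↔
      ∃ k : Nat, 1 ≤ k ∧ pvHit x y d.1 d.2 n m data k) := by
  rw [pvWalkA_char]
  constructor
  · rintro ⟨k, hk1, -, hhit⟩; exact ⟨k, hk1, hhit⟩
  · rintro ⟨k, hk1, hhit⟩
    exact ⟨k, hk1, pvHit_le_fuel x y n m data d hd k hhit, hhit⟩
theorem pvSign_mul (v : Int) : v = (v.natAbs : Int) * pvSign v := by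
  unfold pvSign
  rcases lt_trichotomy v 0 with h | h | h
  · rw [if_neg (by omega), if_pos h]; omega
  · simp [h]
  · rw [if_pos h, if_neg (by omega)]; omega

theorem pvSign_of_neg (v : Int) (h : v < 0) : pvSign v = -1 := by
  unfold pvSign; rw [if_neg (by omega), if_pos h]; ring

theorem pvSign_of_pos (v : Int) (h : 0 < v) : pvSign v = 1 := by
  unfold pvSign; rw [if_pos h, if_neg (by omega)]; ring

theorem pvSign_zero : pvSign 0 = 0 := by decide

theorem pvSign_mem (u v : Int) (h : ¬(u = 0 ∧ v = 0)) : (pvSign u, pvSign v) ∈ DIRECTIONS := by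
  rcases lt_trichotomy u 0 with hu | hu | hu
  · have e1 := pvSign_of_neg u hu
    rcases lt_trichotomy v 0 with hv | hv | hv
    · simp [e1, pvSign_of_neg v hv, DIRECTIONS]
    · subst hv; simp [e1, pvSign_zero, DIRECTIONS]
    · simp [e1, pvSign_of_pos v hv, DIRECTIONS]
  · subst hu
    rcases lt_trichotomy v 0 with hv | hv | hv
    · simp [pvSign_zero, pvSign_of_neg v hv, DIRECTIONS]
    · exact absurd ⟨rfl, hv⟩ h
    · simp [pvSign_zero, pvSign_of_pos v hv, DIRECTIONS]
  · have e1 := pvSign_of_pos u hu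
    rcases lt_trichotomy v 0 with hv | hv | hv
    · simp [e1, pvSign_of_neg v hv, DIRECTIONS]
    · subst hv; simp [e1, pvSign_zero, DIRECTIONS]
    · simp [e1, pvSign_of_pos v hv, DIRECTIONS]

-- core: the line-of-sight test succeeds at the hit cell
theorem pvSees_core (x y n m : Int) (data : List (List String)) (d1 d2 : Int) (k : Nat)
    (hs1 : pvSign ((k:Int)*d1) = d1) (hs2 : pvSign ((k:Int)*d2) = d2)
    (hK : max ((k:Int)*d1).natAbs ((k:Int)*d2).natAbs = k)
    (hnz : ¬((k:Int)*d1 = 0 ∧ (k:Int)*d2 = 0))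
    (hg2 : ¬((k:Int)*d1 ≠ 0 ∧ (k:Int)*d2 ≠ 0 ∧ ((k:Int)*d1).natAbs ≠ ((k:Int)*d2).natAbs))
    (hmid : ∀ i : Int, 1 ≤ i → i < (k:Int) →
      (pvInB n m (x + i*d1) (y + i*d2) ∧ pvCellAt (x + i*d1) (y + i*d2) data = some ".")) :
    pvSees x y data n m (x + (k:Int)*d1) (y + (k:Int)*d2) = true := by
  have hKi : (max (((k:Int)*d1).natAbs : Int) (((k:Int)*d2).natAbs : Int)) = (k:Int) := by
    rw [← Nat.cast_max, hK]
  unfold pvSees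
  simp only [add_sub_cancel_left]
  rw [if_neg hnz, if_neg hg2, hs1, hs2, hKi]
  refine List.all_eq_true.mpr ?_
  intro i hi
  rw [PySem.List.mem_pyRange_one] at hi
  obtain ⟨hin, hcell⟩ := hmid i hi.1 hi.2
  unfold pvInB at hin
  simp [hcell, hin.1, hin.2.1, hin.2.2.1, hin.2.2.2]
theorem pvHit_to_sees (x y n m : Int) (data : List (List String)) (d : Int × Int)
    (hd : d ∈ DIRECTIONS) (k : Nat) (hk : 1 ≤ k) (h : pvHit x y d.1 d.2 n m data k) :
    pvSees x y data n m (x + (k:Int)*d.1) (y + (k:Int)*d.2) = true ∧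
      pvSign (x + (k:Int)*d.1 - x) = d.1 ∧ pvSign (y + (k:Int)*d.2 - y) = d.2 := by
  obtain ⟨d1, d2⟩ := d
  have hp : 0 < (k:Int) := by exact_mod_cast hk
  simp only [DIRECTIONS, List.mem_cons, List.not_mem_nil, or_false, Prod.mk.injEq] at hd
  rcases hd with ⟨rfl, rfl⟩ | ⟨rfl, rfl⟩ | ⟨rfl, rfl⟩ | ⟨rfl, rfl⟩ |
    ⟨rfl, rfl⟩ | ⟨rfl, rfl⟩ | ⟨rfl, rfl⟩ | ⟨rfl, rfl⟩ <;> dsimp only at h ⊢ <;>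
  refine ⟨pvSees_core x y n m data _ _ k ?_ ?_ ?_ ?_ ?_ h.2.2, ?_, ?_⟩ <;>
    first
    | (rw [mul_one]; exact pvSign_of_pos _ hp)
    | (rw [mul_neg_one]; exact pvSign_of_neg _ (by omega))
    | (rw [mul_zero]; exact pvSign_zero)
    | (simp only [add_sub_cancel_left, mul_one]; exact pvSign_of_pos _ hp)
    | (simp only [add_sub_cancel_left, mul_neg_one]; exact pvSign_of_neg _ (by omega))
    | (simp only [add_sub_cancel_left, mul_zero]; exact pvSign_zero)
    | (simp only [mul_one, mul_neg_one, mul_zero, Int.natAbs_neg, Int.natAbs_natCast,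
        Int.natAbs_zero, neg_eq_zero, ne_eq, not_and, not_not]
       first | omega | (intros; trivial))
theorem pvSees_to_hit (x y n m a b : Int) (data : List (List String))
    (hb : pvInB n m a b) (hsees : pvSees x y data n m a b = true) :
    ∃ k : Nat, 1 ≤ k ∧ a = x + (k:Int) * pvSign (a - x) ∧ b = y + (k:Int) * pvSign (b - y) ∧
      (pvSign (a - x), pvSign (b - y)) ∈ DIRECTIONS ∧
      (pvCellAt a b data = some "#" → pvHit x y (pvSign (a - x)) (pvSign (b - y)) n m data k) := by
  unfold pvSees at hsees
  by_cases hg1 : a - x = 0 ∧ b - y = 0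
  · rw [if_pos hg1] at hsees; exact absurd hsees (by simp)
  rw [if_neg hg1] at hsees
  by_cases hg2 : a - x ≠ 0 ∧ b - y ≠ 0 ∧ (a - x).natAbs ≠ (b - y).natAbs
  · rw [if_pos hg2] at hsees; exact absurd hsees (by simp)
  rw [if_neg hg2] at hsees
  set K : Nat := max (a - x).natAbs (b - y).natAbs with hKdef
  have hK1 : 1 ≤ K := by
    rcases Decidable.em (a - x = 0) with h0 | h0
    · have hb0 : b - y ≠ 0 := fun hb0 => hg1 ⟨h0, hb0⟩
      omega
    · omega
  have hda : a - x = (K:Int) * pvSign (a - x) := by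
    rcases eq_or_ne (a - x) 0 with h0 | h0
    · rw [h0, pvSign_zero, mul_zero]
    · have habs : (a - x).natAbs = K := by
        rcases eq_or_ne (b - y) 0 with hb0 | hb0
        · simp [hKdef, hb0]
        · have : (a - x).natAbs = (b - y).natAbs := by
            by_contra hne; exact hg2 ⟨h0, hb0, hne⟩
          simp [hKdef, ← this]
      rw [← habs]; exact pvSign_mul (a - x)
  have hdb : b - y = (K:Int) * pvSign (b - y) := by
    rcases eq_or_ne (b - y) 0 with h0 | h0
    · rw [h0, pvSign_zero, mul_zero]
    · have habs : (b - y).natAbs = K := by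
        rcases eq_or_ne (a - x) 0 with ha0 | ha0
        · simp [hKdef, ha0]
        · have : (a - x).natAbs = (b - y).natAbs := by
            by_contra hne; exact hg2 ⟨ha0, h0, hne⟩
          simp [hKdef, ← this]
      rw [← habs]; exact pvSign_mul (b - y)
  have hKi : (max ((a - x).natAbs : Int) ((b - y).natAbs : Int)) = (K:Int) := by
    rw [← Nat.cast_max]
  refine ⟨K, hK1, by omega, by omega, pvSign_mem _ _ hg1, ?_⟩
  intro hcell
  refine ⟨?_, ?_, ?_⟩
  · have h1 : x + (K:Int) * pvSign (a - x) = a := by omega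
    have h2 : y + (K:Int) * pvSign (b - y) = b := by omega
    rw [h1, h2]; exact hb
  · have h1 : x + (K:Int) * pvSign (a - x) = a := by omega
    have h2 : y + (K:Int) * pvSign (b - y) = b := by omega
    rw [h1, h2]; exact hcell
  · intro i hi1 hik
    have hmem : i ∈ PySem.List.pyRange 1 (max ((a - x).natAbs : Int) ((b - y).natAbs : Int)) 1 := by
      rw [PySem.List.mem_pyRange_one]; exact ⟨hi1, by rw [hKi]; exact hik⟩
    have := List.all_eq_true.mp hsees i hmem
    simp only [Bool.and_eq_true, decide_eq_true_eq, beq_iff_eq] at this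
    exact ⟨this.1, this.2⟩
-- the grid as a list of coordinate pairs
def pvPairs (n m : Int) : List (Int × Int) :=
  (PySem.List.pyRange 0 n 1) ×ˢ (PySem.List.pyRange 0 m 1)

theorem sum_countP_product {α β : Type} (l1 : List α) (l2 : List β) (p : α → β → Bool) :
    ((l1.map fun a => l2.countP fun b => p a b).sum
      = (l1 ×ˢ l2).countP fun c => p c.1 c.2) := by
  induction l1 with
  | nil => simp [SProd.sprod, List.product]
  | cons a l ih =>
    simp only [List.map_cons, List.sum_cons, SProd.sprod, List.product, List.flatMap_cons,
      List.countP_append, List.countP_map] at ih ⊢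
    rw [ih]
    congr 1

theorem mem_pvPairs (n m : Int) (c : Int × Int) :
    c ∈ pvPairs n m ↔ (0 ≤ c.1 ∧ c.1 < n ∧ 0 ≤ c.2 ∧ c.2 < m) := by
  obtain ⟨a, b⟩ := c
  simp [pvPairs, List.mem_product, PySem.List.mem_pyRange_one, and_assoc]

theorem nodup_pvPairs (n m : Int) : (pvPairs n m).Nodup :=
  List.Nodup.product (PySem.List.nodup_pyRange_one 0 n) (PySem.List.nodup_pyRange_one 0 m)

theorem countP_partition (l : List (Int × Int)) (P : Int × Int → Bool) (sig : Int × Int → Int × Int)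
    (hsig : ∀ c ∈ l, P c = true → sig c ∈ DIRECTIONS) :
    l.countP P = (DIRECTIONS.map (fun d => l.countP (fun c => P c && (sig c == d)))).sum := by
  induction l with
  | nil => simp [DIRECTIONS]
  | cons c l ih =>
    have ih' := ih (fun c hc hP => hsig c (List.mem_cons_of_mem _ hc) hP)
    simp only [List.countP_cons, DIRECTIONS, List.map_cons, List.map_nil, List.sum_cons,
      List.sum_nil] at ih' ⊢
    by_cases hc : P c = true
    · have hmem := hsig c List.mem_cons_self hc
      simp only [DIRECTIONS, List.mem_cons, List.not_mem_nil, or_false] at hmem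
      rcases hmem with hs | hs | hs | hs | hs | hs | hs | hs <;>
        simp [hc, hs, ih'] <;> omega
    · have hc' : P c = false := by simpa using hc
      simp [hc', ih']

-- a successful line-of-sight test implies a nonzero offset
theorem pvSees_ne_zero (x y n m a b : Int) (data : List (List String))
    (h : pvSees x y data n m a b = true) : ¬(a - x = 0 ∧ b - y = 0) := by
  intro hz
  unfold pvSees at h
  rw [if_pos hz] at h
  exact absurd h (by simp)
theorem countP_dir (x y n m : Int) (data : List (List String)) (d : Int × Int)
    (hd : d ∈ DIRECTIONS) :
    (pvPairs n m).countP (fun c =>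
        (pvCellAt c.1 c.2 data == some "#" && pvSees x y data n m c.1 c.2) &&
        ((pvSign (c.1 - x), pvSign (c.2 - y)) == d))
      = if pvWalkA (pvFuel x y n m) x y d.1 d.2 data n m then 1 else 0 := by
  by_cases hw : pvWalkA (pvFuel x y n m) x y d.1 d.2 data n m = true
  · obtain ⟨k, hk1, hhit⟩ := (pvWalkA_iff_hit x y n m data d hd).mp hw
    rw [hw, if_pos rfl]
    have hsees := pvHit_to_sees x y n m data d hd k hk1 hhit
    set c0 : Int × Int := (x + (k:Int)*d.1, y + (k:Int)*d.2) with hc0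
    have hc0mem : c0 ∈ pvPairs n m := by
      rw [mem_pvPairs]
      exact ⟨hhit.1.1, hhit.1.2.1, hhit.1.2.2.1, hhit.1.2.2.2⟩
    have hpred : ∀ c ∈ pvPairs n m,
        (((pvCellAt c.1 c.2 data == some "#" && pvSees x y data n m c.1 c.2) &&
          ((pvSign (c.1 - x), pvSign (c.2 - y)) == d)) = true ↔ (c == c0) = true) := by
      intro c hcmem
      rw [mem_pvPairs] at hcmem
      constructor
      · intro hp
        simp only [Bool.and_eq_true, beq_iff_eq] at hp
        obtain ⟨⟨hcellb, hseesb⟩, hsigb⟩ := hp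
        obtain ⟨k', hk1', he1, he2, -, hhit'⟩ :=
          pvSees_to_hit x y n m c.1 c.2 data
            ⟨hcmem.1, hcmem.2.1, hcmem.2.2.1, hcmem.2.2.2⟩ hseesb
        have hs1 : pvSign (c.1 - x) = d.1 := by rw [← hsigb]
        have hs2 : pvSign (c.2 - y) = d.2 := by rw [← hsigb]
        rw [hs1] at he1
        rw [hs2] at he2
        rw [hs1, hs2] at hhit'
        have hhit'' := hhit' hcellb
        have hkk := pvHit_uniq x y d.1 d.2 n m data k' k hk1' hk1 hhit'' hhit
        subst hkk
        simp only [beq_iff_eq, hc0, Prod.ext_iff]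
        exact ⟨by omega, by omega⟩
      · intro hq
        have hq' : c = c0 := by simpa using hq
        subst hq'
        simp only [Bool.and_eq_true, beq_iff_eq]
        refine ⟨⟨?_, hsees.1⟩, ?_⟩
        · exact hhit.2.1
        · rw [Prod.ext_iff]
          exact ⟨hsees.2.1, hsees.2.2⟩
    rw [List.countP_congr hpred, ← List.count_eq_countP,
      List.count_eq_one_of_mem (nodup_pvPairs n m) hc0mem]
  · rw [if_neg hw]
    rw [List.countP_eq_zero]
    intro c hcmem hp
    rw [mem_pvPairs] at hcmem
    simp only [Bool.and_eq_true, beq_iff_eq] at hp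
    obtain ⟨⟨hcellb, hseesb⟩, hsigb⟩ := hp
    obtain ⟨k', hk1', -, -, -, hhit'⟩ :=
      pvSees_to_hit x y n m c.1 c.2 data
        ⟨hcmem.1, hcmem.2.1, hcmem.2.2.1, hcmem.2.2.2⟩ hseesb
    have hs1 : pvSign (c.1 - x) = d.1 := by rw [← hsigb]
    have hs2 : pvSign (c.2 - y) = d.2 := by rw [← hsigb]
    rw [hs1, hs2] at hhit'
    exact hw ((pvWalkA_iff_hit x y n m data d hd).mpr ⟨k', hk1', hhit' hcellb⟩)

theorem pvOccupied_eq_countP (x y n m : Int) (data : List (List String)) :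
    pvOccupied x y data n m
      = DIRECTIONS.countP (fun d => pvWalkA (pvFuel x y n m) x y d.1 d.2 data n m) := by
  unfold pvOccupied
  rw [sum_countP_product]
  rw [show (PySem.List.pyRange 0 n 1 ×ˢ PySem.List.pyRange 0 m 1) = pvPairs n m from rfl]
  rw [countP_partition _ _ (fun c => (pvSign (c.1 - x), pvSign (c.2 - y)))
      (fun c _ hP => by
        simp only [Bool.and_eq_true] at hP
        exact pvSign_mem _ _ (pvSees_ne_zero x y n m c.1 c.2 data hP.2))]
  have hmap : DIRECTIONS.map (fun d => (pvPairs n m).countP (fun c =>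
        (pvCellAt c.1 c.2 data == some "#" && pvSees x y data n m c.1 c.2) &&
        ((pvSign (c.1 - x), pvSign (c.2 - y)) == d)))
      = DIRECTIONS.map (fun d =>
          if pvWalkA (pvFuel x y n m) x y d.1 d.2 data n m then 1 else 0) :=
    List.map_congr_left (fun d hd => countP_dir x y n m data d hd)
  rw [hmap]
  induction DIRECTIONS with
  | nil => simp
  | cons d ds ih =>
    simp only [List.map_cons, List.sum_cons, List.countP_cons, ih]
    by_cases h : pvWalkA (pvFuel x y n m) x y d.1 d.2 data n m <;> simp [h] <;> omega


-- A's 'L' loop is true exactly when the occupied count is nonzero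
theorem pvLoopL_eq_countP (x y : Int) (data : List (List String)) (n m : Int)
    (ds : List (Int × Int)) :
    pvLoopL x y data n m ds
      = decide (0 < ds.countP (fun d => pvWalkA (pvFuel x y n m) x y d.1 d.2 data n m)) := by
  induction ds with
  | nil => simp [pvLoopL]
  | cons d ds ih =>
    simp only [pvLoopL, List.countP_cons]
    by_cases h : pvWalkA (pvFuel x y n m) x y d.1 d.2 data n m
    · simp [h]
    · simp [h, ih]

-- A's '#' loop returns 'L' exactly when fulls plus the remaining occupied count reaches 5
theorem pvLoopH_eq_countP (x y : Int) (data : List (List String)) (n m : Int)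
    (ds : List (Int × Int)) (fulls : Int) (hf : fulls < 5) :
    pvLoopH x y data n m fulls ds
      = if 5 ≤ fulls + (ds.countP (fun d => pvWalkA (pvFuel x y n m) x y d.1 d.2 data n m) : Int)
        then some "L" else none := by
  induction ds generalizing fulls with
  | nil => simp [pvLoopH]; omega
  | cons d ds ih =>
    simp only [pvLoopH, List.countP_cons]
    by_cases h : pvWalkA (pvFuel x y n m) x y d.1 d.2 data n m
    · simp only [h, if_true]
      by_cases h5 : (5:Int) ≤ fulls + 1
      · rw [if_pos h5, if_pos (by push_cast; omega)]
      · rw [if_neg h5, ih (fulls + 1) (by omega)]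
        refine if_congr ?_ rfl rfl
        push_cast
        omega
    · simp only [h, if_false, Bool.false_eq_true]
      rw [ih fulls hf]
      refine if_congr ?_ rfl rfl
      simp

-- ===== VERDICT (by name: the statement is the Claim_ definition above) =====
theorem replace_seat_long_spec : Claim_equal_replace_seat_long := by
  intro x y data n m _ hpre
  unfold Spec_replace_seat_long replace_seat_long replace_seat_long_alt
  obtain ⟨hsome, _⟩ := hpre
  cases hc : pvCellAt x y data with
  | none => rfl
  | some c =>
    have hcount := pvOccupied_eq_countP x y n m data
    by_cases hL : c = "L"
    · subst hL
      rw [pvLoopL_eq_countP, ← hcount]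
      by_cases h0 : pvOccupied x y data n m = 0
      · simp [h0]
      · simp [h0, Nat.pos_of_ne_zero h0]
    · by_cases hH : c = "#"
      · subst hH
        rw [pvLoopH_eq_countP x y data n m DIRECTIONS 0 (by omega), ← hcount]
        by_cases h5 : 5 ≤ pvOccupied x y data n m
        · simp [h5]
        · simp [h5]
      · simp [hL, hH]
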